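-- pv_equiv track=rewrite | github.com/allemp/progradu | speechrecognition/notebooks/timeseries_analysis.py | keyword_counter
-- ===== SOURCE A (Python) =====
-- def keyword_counter(window,keywords):
--     result = {}
--     for key, value in keywords.items():
--         count = 0
--         for word in value:
--             count += window.count(word)
--         result[key] = count
--     result["other"] = len(window) - sum(result.values())
--     return result
-- ===== SOURCE B (Python) =====
-- def keyword_counter(window, keywords):
--     # multiplicity table: (key, word) -> how many times word appears in that key's list
--     mult = {}
--     for key, value in keywords.items():
--         for w in value:
--             mult[(key, w)] = mult.get((key, w), 0) + 1
--     result = dict.fromkeys(keywords, 0)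
--     # one streaming pass over the window, crediting every category at once
--     for word in window:
--         for key in keywords:
--             result[key] += mult.get((key, word), 0)
--     result["other"] = len(window) - sum(result.values())
--     return result
-- ===== Notes on version B (the rewrite author's own statement) =====
-- stated objective: alternative
-- what changed: B transposes the loops: it precomputes a (key, word) multiplicity table from the keyword groups and then makes one streaming pass over the window, crediting each category per window word, instead of A's per-category scans of the window for every keyword word; Pre_ excludes association lists with duplicate keys, which cannot arise from A's dict argument.
import Mathlib
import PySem

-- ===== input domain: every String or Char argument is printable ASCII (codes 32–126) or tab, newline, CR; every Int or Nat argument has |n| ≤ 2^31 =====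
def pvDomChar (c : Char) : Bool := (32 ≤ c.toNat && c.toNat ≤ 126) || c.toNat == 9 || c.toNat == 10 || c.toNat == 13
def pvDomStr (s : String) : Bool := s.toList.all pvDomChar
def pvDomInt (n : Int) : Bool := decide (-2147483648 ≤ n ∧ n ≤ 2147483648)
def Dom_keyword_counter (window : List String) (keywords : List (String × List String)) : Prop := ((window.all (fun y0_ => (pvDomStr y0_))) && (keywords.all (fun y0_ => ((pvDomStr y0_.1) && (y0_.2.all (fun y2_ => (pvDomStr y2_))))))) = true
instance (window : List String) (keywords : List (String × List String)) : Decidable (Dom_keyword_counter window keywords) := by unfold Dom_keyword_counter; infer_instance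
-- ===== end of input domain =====

-- B transposes A's loops: it precomputes a (key, word) multiplicity table from the keyword groups and then
-- makes one streaming pass over the window crediting every category, instead of A's per-category window scans
-- (objective: alternative traversal; Pre_ excludes duplicate-key association lists, impossible for A's dict argument).


-- ===== PORT A =====
def keyword_counter (window : List String) (keywords : List (String × List String)) : List (String × Int) :=
  let result : PySem.Dict String Int :=
    keywords.foldl (fun r kv =>
      r.insert kv.1 (kv.2.foldl (fun c w => c + (PySem.List.count window w : Int)) 0))
      PySem.Dict.empty
  let result := result.insert "other" ((window.length : Int) - result.values.sum)
  result.items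

-- ===== PORT B =====
def keyword_counter_alt (window : List String) (keywords : List (String × List String)) : List (String × Int) :=
  let mult : PySem.Dict (String × String) Int :=
    keywords.foldl (fun m kv =>
      kv.2.foldl (fun m w => m.insert (kv.1, w) (m.getD (kv.1, w) 0 + 1)) m)
      PySem.Dict.empty
  let result : PySem.Dict String Int :=
    keywords.foldl (fun r kv => r.insert kv.1 0) PySem.Dict.empty
  let result :=
    window.foldl (fun r word =>
      keywords.foldl (fun r kv => r.insert kv.1 (r.getD kv.1 0 + mult.getD (kv.1, word) 0)) r)
      result
  let result := result.insert "other" ((window.length : Int) - result.values.sum)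
  result.items

-- ===== PRECONDITION & SPEC =====
-- Pre_ excludes association lists with duplicate keys: Python A's `keywords` is a dict, so duplicate keys
-- cannot reach it (an encoding artefact of dict → List (String × List String)).
def Pre_keyword_counter (window : List String) (keywords : List (String × List String)) : Prop :=
  (keywords.map Prod.fst).Nodup
instance (window : List String) (keywords : List (String × List String)) : Decidable (Pre_keyword_counter window keywords) := by unfold Pre_keyword_counter; infer_instance
def pvWitness_keyword_counter : List String × (List (String × List String)) :=
  (["a", "b", "a"], [("k", ["a"]), ("m", ["b", "c"])])

def Spec_keyword_counter (window : List String) (keywords : List (String × List String)) (out : List (String × Int)) : Prop := out = keyword_counter_alt window keywords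
instance (window : List String) (keywords : List (String × List String)) (out : List (String × Int)) : Decidable (Spec_keyword_counter window keywords out) := by unfold Spec_keyword_counter; infer_instance

-- ===== CLAIM (what is proved, stated in full; the proofs are below) =====
def Claim_equal_keyword_counter : Prop := ∀ (window : List String) (keywords : List (String × List String)), Dom_keyword_counter window keywords → Pre_keyword_counter window keywords → Spec_keyword_counter window keywords (keyword_counter window keywords)

-- ===== LEMMAS AND PROOFS =====

-- mult's inner fold leaves entries of a different first component unchanged
theorem pv_mult_inner_ne (c : String) (l : List String) (m : PySem.Dict (String × String) Int)
    (k w : String) (hk : k ≠ c) :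
    (l.foldl (fun m x => m.insert (c, x) (m.getD (c, x) 0 + 1)) m).getD (k, w) 0 = m.getD (k, w) 0 := by
  induction l generalizing m with
  | nil => rfl
  | cons x xs ih =>
      simp only [List.foldl_cons, ih]
      exact PySem.Dict.getD_insert_of_ne _ _ _ (by simp [Prod.ext_iff, hk])

-- mult's inner fold at its own key counts occurrences
theorem pv_mult_inner_self (c : String) (l : List String) (m : PySem.Dict (String × String) Int)
    (w : String) :
    (l.foldl (fun m x => m.insert (c, x) (m.getD (c, x) 0 + 1)) m).getD (c, w) 0
      = m.getD (c, w) 0 + (l.count w : Int) := by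
  have h : l.foldl (fun m x => m.insert (c, x) (m.getD (c, x) 0 + 1)) m
      = (l.map (fun x => (c, x))).foldl (fun m p => m.insert p (m.getD p 0 + 1)) m := by
    rw [List.foldl_map]
  rw [h, PySem.Dict.getD_foldl_insert_add_one]
  have : (l.map (fun x => (c, x))).count (c, w) = l.count w := by
    exact List.count_map_of_injective l (fun x => (c, x)) (fun a b h => by simpa using h) w
  rw [this]

-- keys absent from keywords are never touched by the mult-building fold
theorem pv_mult_ne (kws : List (String × List String)) (m : PySem.Dict (String × String) Int)
    (k w : String) (hk : k ∉ kws.map Prod.fst) :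
    (kws.foldl (fun m kv => kv.2.foldl (fun m x => m.insert (kv.1, x) (m.getD (kv.1, x) 0 + 1)) m) m).getD (k, w) 0
      = m.getD (k, w) 0 := by
  induction kws generalizing m with
  | nil => rfl
  | cons kv rest ih =>
      simp only [List.map_cons, List.mem_cons, not_or] at hk
      simp only [List.foldl_cons, ih _ hk.2, pv_mult_inner_ne _ _ _ _ _ hk.1]

-- mult.getD (kv.1, w) 0 = how often w occurs in kv's keyword list (unique keys)
theorem pv_mult_val (kws : List (String × List String)) (m : PySem.Dict (String × String) Int)
    (kv : String × List String) (w : String)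
    (hnd : (kws.map Prod.fst).Nodup) (hmem : kv ∈ kws) :
    (kws.foldl (fun m kv' => kv'.2.foldl (fun m x => m.insert (kv'.1, x) (m.getD (kv'.1, x) 0 + 1)) m) m).getD (kv.1, w) 0
      = m.getD (kv.1, w) 0 + (kv.2.count w : Int) := by
  induction kws generalizing m with
  | nil => cases hmem
  | cons a rest ih =>
      simp only [List.map_cons, List.nodup_cons] at hnd
      rcases List.mem_cons.mp hmem with h | h
      · subst h
        simp only [List.foldl_cons]
        rw [pv_mult_ne _ _ _ _ (by simpa using hnd.1), pv_mult_inner_self]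
      · have hne : kv.1 ≠ a.1 := fun he => hnd.1 (he ▸ List.mem_map_of_mem h)
        simp only [List.foldl_cons]
        rw [ih _ hnd.2 h, pv_mult_inner_ne _ _ _ _ _ hne]

-- the per-word update fold leaves keys outside keywords unchanged
theorem pv_upd_ne (kws : List (String × List String)) (f : String × List String → Int)
    (r : PySem.Dict String Int) (k : String) (hk : k ∉ kws.map Prod.fst) :
    (kws.foldl (fun r kv => r.insert kv.1 (r.getD kv.1 0 + f kv)) r).getD k 0 = r.getD k 0 := by
  induction kws generalizing r with
  | nil => rfl
  | cons kv rest ih =>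
      simp only [List.map_cons, List.mem_cons, not_or] at hk
      simp only [List.foldl_cons, ih _ hk.2]
      exact PySem.Dict.getD_insert_of_ne _ _ _ hk.1

-- the per-word update fold adds exactly f kv at key kv.1 (unique keys)
theorem pv_upd_val (kws : List (String × List String)) (f : String × List String → Int)
    (r : PySem.Dict String Int) (kv : String × List String)
    (hnd : (kws.map Prod.fst).Nodup) (hmem : kv ∈ kws) :
    (kws.foldl (fun r kv' => r.insert kv'.1 (r.getD kv'.1 0 + f kv')) r).getD kv.1 0
      = r.getD kv.1 0 + f kv := by
  induction kws generalizing r with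
  | nil => cases hmem
  | cons a rest ih =>
      simp only [List.map_cons, List.nodup_cons] at hnd
      rcases List.mem_cons.mp hmem with h | h
      · subst h
        simp only [List.foldl_cons]
        rw [pv_upd_ne _ _ _ _ (by simpa using hnd.1), PySem.Dict.getD_insert_self]
      · have hne : kv.1 ≠ a.1 := fun he => hnd.1 (he ▸ List.mem_map_of_mem h)
        simp only [List.foldl_cons]
        rw [ih _ hnd.2 h, PySem.Dict.getD_insert_of_ne _ _ _ hne]

-- streaming over the window accumulates the multiplicities word by word
theorem pv_window_val (ws : List String) (kws : List (String × List String))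
    (g : String → String → Int) (r : PySem.Dict String Int) (kv : String × List String)
    (hnd : (kws.map Prod.fst).Nodup) (hmem : kv ∈ kws) :
    (ws.foldl (fun r word => kws.foldl (fun r kv' => r.insert kv'.1 (r.getD kv'.1 0 + g kv'.1 word)) r) r).getD kv.1 0
      = r.getD kv.1 0 + (ws.map (fun word => g kv.1 word)).sum := by
  induction ws generalizing r with
  | nil => simp
  | cons w rest ih =>
      simp only [List.foldl_cons, List.map_cons, List.sum_cons]
      rw [ih _ , pv_upd_val kws (fun kv' => g kv'.1 w) r kv hnd hmem]
      ring

-- Set.update by already-present elements is the identity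
theorem pv_set_update_id {α : Type} [BEq α] [LawfulBEq α] (s : List α) (xs : List α)
    (h : ∀ x ∈ xs, x ∈ s) : PySem.Set.update s xs = s := by
  induction xs generalizing s with
  | nil => rfl
  | cons x rest ih =>
      rw [PySem.Set.update_cons, PySem.Set.add_of_mem (h x (by simp))]
      exact ih s (fun y hy => h y (by simp [hy]))

-- the window fold keeps the key list of the running result
theorem pv_window_keys (ws : List String) (kws : List (String × List String))
    (g : String → String → Int) (r : PySem.Dict String Int)
    (h : ∀ k ∈ kws.map Prod.fst, k ∈ r.keys) :
    (ws.foldl (fun r word => kws.foldl (fun r kv' => r.insert kv'.1 (r.getD kv'.1 0 + g kv'.1 word)) r) r).keys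
      = r.keys := by
  induction ws generalizing r with
  | nil => rfl
  | cons w rest ih =>
      simp only [List.foldl_cons]
      have hkeys : (kws.foldl (fun r kv' => r.insert kv'.1 (r.getD kv'.1 0 + g kv'.1 w)) r).keys = r.keys := by
        rw [PySem.Dict.keys_foldl_insert_key]
        exact pv_set_update_id _ _ h
      rw [ih _, hkeys]
      intro k hk; rw [hkeys]; exact h k hk

-- double counting: scanning the window once per keyword word equals crediting per window word
theorem pv_exchange (v ws : List String) :
    v.foldl (fun c w => c + (PySem.List.count ws w : Int)) 0
      = (ws.map (fun w => (v.count w : Int))).sum := by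
  rw [PySem.List.foldl_add]
  simp only [PySem.List.count_eq, zero_add]
  induction ws with
  | nil => simp
  | cons w rest ih =>
      simp only [List.map_cons, List.sum_cons]
      have hcnt : ∀ x : String, ((w :: rest).count x : Int) = (rest.count x : Int) + (if x = w then 1 else 0) := by
        intro x
        rw [List.count_cons]
        by_cases hx : x = w
        · subst hx; simp
        · simp [beq_iff_eq, hx, Ne.symm hx]
      calc (v.map (fun x => ((w :: rest).count x : Int))).sum
          = (v.map (fun x => (rest.count x : Int) + (if x = w then 1 else 0))).sum := by
            exact congrArg List.sum (List.map_congr_left (fun x _ => hcnt x))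
        _ = (v.map (fun x => (rest.count x : Int))).sum + (v.map (fun x => (if x = w then (1:Int) else 0))).sum := by
            rw [← List.sum_map_add]
        _ = (v.count w : Int) + (rest.map (fun u => (v.count u : Int))).sum := by
            rw [ih]
            have : (v.map (fun x => (if x = w then (1:Int) else 0))).sum = (v.count w : Int) := by
              simpa [beq_iff_eq, List.count] using PySem.List.sum_map_ite_one_zero (· == w) v
            rw [this]; ring

-- the two result dicts (before the "other" entry) are equal
theorem pv_dicts_eq (window : List String) (keywords : List (String × List String))
    (hnd : (keywords.map Prod.fst).Nodup) :
    keywords.foldl (fun r kv =>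
        r.insert kv.1 (kv.2.foldl (fun c w => c + (PySem.List.count window w : Int)) 0))
        PySem.Dict.empty
      = window.foldl (fun r word =>
          keywords.foldl (fun r kv => r.insert kv.1 (r.getD kv.1 0 +
            (keywords.foldl (fun m kv' => kv'.2.foldl (fun m x => m.insert (kv'.1, x) (m.getD (kv'.1, x) 0 + 1)) m) PySem.Dict.empty).getD (kv.1, word) 0)) r)
          (keywords.foldl (fun r kv => r.insert kv.1 0) PySem.Dict.empty) := by
  apply PySem.Dict.ext
  have hfreshA : (keywords.foldl (fun r kv =>
      r.insert kv.1 (kv.2.foldl (fun c w => c + (PySem.List.count window w : Int)) 0))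
      (PySem.Dict.empty : PySem.Dict String Int)).items
      = keywords.map (fun kv => (kv.1, kv.2.foldl (fun c w => c + (PySem.List.count window w : Int)) 0)) := by
    rw [PySem.Dict.items_foldl_insert_fresh keywords Prod.fst
      (fun kv => kv.2.foldl (fun c w => c + (PySem.List.count window w : Int)) 0)
      PySem.Dict.empty (fun a _ => PySem.Dict.contains_empty _) hnd]
    simp [PySem.Dict.empty]
  have hfresh0 : (keywords.foldl (fun r kv => r.insert kv.1 0)
      (PySem.Dict.empty : PySem.Dict String Int)).items
      = keywords.map (fun kv => (kv.1, (0 : Int))) := by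
    rw [PySem.Dict.items_foldl_insert_fresh keywords Prod.fst (fun _ => (0 : Int))
      PySem.Dict.empty (fun a _ => PySem.Dict.contains_empty _) hnd]
    simp [PySem.Dict.empty]
  have hkeys0 : (keywords.foldl (fun r kv => r.insert kv.1 0)
      (PySem.Dict.empty : PySem.Dict String Int)).keys = keywords.map Prod.fst := by
    simp only [PySem.Dict.keys, hfresh0, List.map_map]
    rfl
  set mult := keywords.foldl (fun m kv' => kv'.2.foldl (fun m x => m.insert (kv'.1, x) (m.getD (kv'.1, x) 0 + 1)) m) (PySem.Dict.empty : PySem.Dict (String × String) Int) with hmult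
  set r0 := keywords.foldl (fun r kv => r.insert kv.1 0) (PySem.Dict.empty : PySem.Dict String Int) with hr0
  set dB := window.foldl (fun r word =>
      keywords.foldl (fun r kv => r.insert kv.1 (r.getD kv.1 0 + mult.getD (kv.1, word) 0)) r) r0 with hdB
  have hkeysB : dB.keys = keywords.map Prod.fst := by
    rw [hdB, pv_window_keys window keywords (fun k word => mult.getD (k, word) 0) r0
      (by rw [hkeys0]; exact fun k hk => hk), hkeys0]
  have hitemsB : dB.items = dB.keys.map (fun k => (k, dB.getD k 0)) :=
    PySem.Dict.items_eq_map_keys dB (hkeysB ▸ hnd) 0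
  rw [hfreshA, hitemsB, hkeysB, List.map_map]
  apply List.map_congr_left
  intro kv hkv
  have hval : dB.getD kv.1 0 = (window.map (fun word => mult.getD (kv.1, word) 0)).sum := by
    rw [hdB, pv_window_val window keywords (fun k word => mult.getD (k, word) 0) r0 kv hnd hkv]
    have : r0.getD kv.1 0 = 0 := by
      apply PySem.Dict.getD_of_mem_items (d := r0)
      · rw [hfresh0]; exact List.mem_map_of_mem hkv
      · rw [hkeys0]; exact hnd
    rw [this, zero_add]
  simp only [Function.comp]
  rw [hval]
  have hm : ∀ word, mult.getD (kv.1, word) 0 = (kv.2.count word : Int) := by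
    intro word
    rw [hmult, pv_mult_val keywords PySem.Dict.empty kv word hnd hkv, PySem.Dict.getD_empty, zero_add]
  rw [List.map_congr_left (fun word _ => hm word), ← pv_exchange]

-- ===== VERDICT (by name: the statement is the Claim_ definition above) =====
theorem keyword_counter_spec : Claim_equal_keyword_counter := by
  intro window keywords _ hpre
  unfold Spec_keyword_counter keyword_counter keyword_counter_alt
  rw [pv_dicts_eq window keywords hpre]
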